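-- pv_equiv track=rewrite | github.com/SkiFFFxx/Py-Tasks | main.py | diversity_after_changes
-- ===== SOURCE A (Python) =====
-- def diversity_after_changes(initial_a, initial_b, updates):
--     unique_a = set(initial_a)
--     unique_b = set(initial_b)
--     results = []
--
--     for update in updates:
--         action, who, card = update
--
--         if who == 'A':
--             if action == 1:
--                 unique_a.add(card)
--             elif card in unique_a:
--                 unique_a.remove(card)
--         elif who == 'B':
--             if action == 1:
--                 unique_b.add(card)
--             elif card in unique_b:
--                 unique_b.remove(card)
--
--         remaining_a = unique_a - unique_b
--         remaining_b = unique_b - unique_a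
--         total_unique = len(remaining_a) + len(remaining_b)
--         results.append(total_unique)
--
--     return results
-- ===== SOURCE B (Python) =====
-- def diversity_after_changes(initial_a, initial_b, updates):
--     a = set(initial_a)
--     b = set(initial_b)
--     count = len(a ^ b)
--     results = []
--     for action, who, card in updates:
--         if who == 'A':
--             if action == 1:
--                 if card not in a:
--                     count += -1 if card in b else 1
--                     a.add(card)
--             elif card in a:
--                 count += 1 if card in b else -1
--                 a.remove(card)
--         elif who == 'B':
--             if action == 1:
--                 if card not in b:
--                     count += -1 if card in a else 1
--                     b.add(card)
--             elif card in b: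
--                 count += 1 if card in a else -1
--                 b.remove(card)
--         results.append(count)
--     return results
-- ===== Notes on version B (the rewrite author's own statement) =====
-- stated objective: faster
-- what changed: B maintains the symmetric-difference size as a running counter updated in O(1) per change instead of recomputing both set differences after every update.
import Mathlib
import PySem

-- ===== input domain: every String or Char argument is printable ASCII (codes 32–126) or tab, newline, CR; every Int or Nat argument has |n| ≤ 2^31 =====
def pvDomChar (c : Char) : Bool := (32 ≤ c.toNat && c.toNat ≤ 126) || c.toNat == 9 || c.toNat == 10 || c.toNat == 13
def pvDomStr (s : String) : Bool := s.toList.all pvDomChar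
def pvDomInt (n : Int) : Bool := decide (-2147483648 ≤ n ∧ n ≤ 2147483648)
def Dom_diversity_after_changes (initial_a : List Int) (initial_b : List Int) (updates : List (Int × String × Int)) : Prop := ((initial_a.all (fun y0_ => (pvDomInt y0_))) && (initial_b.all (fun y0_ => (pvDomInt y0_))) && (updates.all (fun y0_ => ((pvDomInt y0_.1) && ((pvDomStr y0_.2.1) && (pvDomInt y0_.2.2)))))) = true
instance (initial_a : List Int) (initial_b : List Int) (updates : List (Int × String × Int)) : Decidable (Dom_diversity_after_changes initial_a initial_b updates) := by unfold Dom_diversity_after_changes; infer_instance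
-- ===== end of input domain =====

-- B replaces A's per-update recomputation of both set differences by a running
-- symmetric-difference counter updated in O(1) per change (objective: faster).


-- ===== PORT A =====
-- loop body of A: update the relevant set, then recompute both differences
def pvStepA (st : PySem.Set Int × PySem.Set Int × List Int) (u : Int × String × Int) :
    PySem.Set Int × PySem.Set Int × List Int :=
  let (unique_a, unique_b, results) := st
  let (action, who, card) := u
  let (unique_a, unique_b) :=
    if who == "A" then
      if action == 1 then (PySem.Set.add unique_a card, unique_b)
      else if PySem.Set.contains unique_a card then
        ((PySem.Set.remove? unique_a card).getD unique_a, unique_b)  -- guard makes remove? a some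
      else (unique_a, unique_b)
    else if who == "B" then
      if action == 1 then (unique_a, PySem.Set.add unique_b card)
      else if PySem.Set.contains unique_b card then
        (unique_a, (PySem.Set.remove? unique_b card).getD unique_b)
      else (unique_a, unique_b)
    else (unique_a, unique_b)
  let remaining_a := PySem.Set.diff unique_a unique_b
  let remaining_b := PySem.Set.diff unique_b unique_a
  let total_unique := PySem.Set.len remaining_a + PySem.Set.len remaining_b
  (unique_a, unique_b, results ++ [total_unique])

def diversity_after_changes (initial_a : List Int) (initial_b : List Int) (updates : List (Int × String × Int)) : List Int :=
  (updates.foldl pvStepA (PySem.Set.ofList initial_a, PySem.Set.ofList initial_b, [])).2.2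

-- ===== PORT B =====
-- loop body of B: toggle membership and adjust the running counter in O(1)
def pvStepB (st : PySem.Set Int × PySem.Set Int × Int × List Int) (u : Int × String × Int) :
    PySem.Set Int × PySem.Set Int × Int × List Int :=
  let (a, b, count, results) := st
  let (action, who, card) := u
  let (a, b, count) :=
    if who == "A" then
      if action == 1 then
        if !PySem.Set.contains a card then
          (PySem.Set.add a card, b, count + (if PySem.Set.contains b card then -1 else 1))
        else (a, b, count)
      else if PySem.Set.contains a card then
        (PySem.Set.discard a card, b, count + (if PySem.Set.contains b card then 1 else -1))
      else (a, b, count)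
    else if who == "B" then
      if action == 1 then
        if !PySem.Set.contains b card then
          (a, PySem.Set.add b card, count + (if PySem.Set.contains a card then -1 else 1))
        else (a, b, count)
      else if PySem.Set.contains b card then
        (a, PySem.Set.discard b card, count + (if PySem.Set.contains a card then 1 else -1))
      else (a, b, count)
    else (a, b, count)
  (a, b, count, results ++ [count])

def diversity_after_changes_alt (initial_a : List Int) (initial_b : List Int) (updates : List (Int × String × Int)) : List Int :=
  let a := PySem.Set.ofList initial_a
  let b := PySem.Set.ofList initial_b
  let count := PySem.Set.len (PySem.Set.symmDiff a b)
  (updates.foldl pvStepB (a, b, count, [])).2.2.2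

-- ===== PRECONDITION & SPEC =====
def Spec_diversity_after_changes (initial_a : List Int) (initial_b : List Int) (updates : List (Int × String × Int)) (out : List Int) : Prop := out = diversity_after_changes_alt initial_a initial_b updates
instance (initial_a : List Int) (initial_b : List Int) (updates : List (Int × String × Int)) (out : List Int) : Decidable (Spec_diversity_after_changes initial_a initial_b updates out) := by unfold Spec_diversity_after_changes; infer_instance

-- ===== CLAIM (what is proved, stated in full; the proofs are below) =====
def Claim_equal_diversity_after_changes : Prop := ∀ (initial_a : List Int) (initial_b : List Int) (updates : List (Int × String × Int)), Dom_diversity_after_changes initial_a initial_b updates → Spec_diversity_after_changes initial_a initial_b updates (diversity_after_changes initial_a initial_b updates)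

-- ===== LEMMAS AND PROOFS =====

-- the value A recomputes each round
def pvSc (a b : List Int) : Int :=
  ((PySem.Set.diff a b).length : Int) + ((PySem.Set.diff b a).length : Int)

-- filters whose predicates agree off one element: length difference at that element only
theorem pvFilterLen (card : Int) (p q : Int → Bool) (hpq : ∀ x, x ≠ card → p x = q x) :
    ∀ (l : List Int), l.Nodup →
      ((l.filter p).length : Int) = (l.filter q).length
        + (if card ∈ l then (if p card then 1 else 0) - (if q card then 1 else 0) else 0) := by
  intro l
  induction l with
  | nil => simp
  | cons x t ih =>
    intro hn
    rw [List.nodup_cons] at hn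
    obtain ⟨hx, ht⟩ := hn
    by_cases hxc : x = card
    · subst hxc
      have : t.filter p = t.filter q := by
        apply List.filter_congr
        intro y hy
        exact hpq y (fun h => hx (h ▸ hy))
      simp [List.filter_cons, this, hx]
      split_ifs <;> simp
    · have hpx : p x = q x := hpq x hxc
      have iht := ih ht
      simp only [List.filter_cons, hpx, List.mem_cons, Ne.symm hxc, false_or]
      by_cases hq : q x <;> by_cases hct : card ∈ t <;>
        simp [hq, hct] at iht ⊢ <;> omega

theorem pvScAdd (a b : List Int) (card : Int) (hb : b.Nodup) (h : card ∉ a) :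
    pvSc (a ++ [card]) b = pvSc a b + (if card ∈ b then -1 else 1) := by
  unfold pvSc PySem.Set.diff
  have h1 : ((a ++ [card]).filter (fun x => !PySem.Set.contains b x)).length
      = (a.filter (fun x => !PySem.Set.contains b x)).length
        + (if card ∈ b then 0 else 1) := by
    rw [List.filter_append]
    by_cases hcb : card ∈ b <;>
      simp [PySem.Set.contains, hcb]
  have h2 := pvFilterLen card (fun x => !PySem.Set.contains (a ++ [card]) x)
      (fun x => !PySem.Set.contains a x)
      (by
        intro x hx
        simp [PySem.Set.contains, hx])
      b hb
  simp only [PySem.Set.contains] at h1 h2 ⊢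
  rw [h1, h2]
  simp [h]
  by_cases hcb : card ∈ b <;> simp [hcb] <;> omega

theorem pvScDiscard (a b : List Int) (card : Int) (ha : a.Nodup) (hb : b.Nodup) (h : card ∈ a) :
    pvSc (PySem.Set.discard a card) b = pvSc a b + (if card ∈ b then 1 else -1) := by
  unfold pvSc PySem.Set.diff PySem.Set.discard
  rw [List.filter_filter]
  have h1 := pvFilterLen card
      (fun x => !PySem.Set.contains b x && !(x == card))
      (fun x => !PySem.Set.contains b x)
      (by intro x hx; simp [hx]) a ha
  have h2 := pvFilterLen card
      (fun x => !PySem.Set.contains (List.filter (fun y => !y == card) a) x)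
      (fun x => !PySem.Set.contains a x)
      (by
        intro x hx
        simp [PySem.Set.contains, hx]) b hb
  simp only [PySem.Set.contains] at h1 h2 ⊢
  rw [h1, h2]
  simp [h]
  by_cases hcb : card ∈ b <;> simp [hcb] <;> omega

theorem pvLoop : ∀ (us : List (Int × String × Int)) (a b : PySem.Set Int) (c : Int) (res : List Int),
    a.Nodup → b.Nodup → c = pvSc a b →
    (us.foldl pvStepA (a, b, res)).2.2 = (us.foldl pvStepB (a, b, c, res)).2.2.2 := by
  intro us
  induction us with
  | nil => intro a b c res _ _ _; simp
  | cons u t ih =>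
    intro a b c res ha hb hc
    obtain ⟨action, who, card⟩ := u
    simp only [List.foldl_cons]
    by_cases hwa : who = "A"
    · by_cases hact : action = 1
      · by_cases hca : card ∈ a
        · have hadd : PySem.Set.add a card = a := PySem.Set.add_of_mem hca
          simp only [pvStepA, pvStepB, PySem.Set.contains]
          simp [hwa, hact, hca]
          rw [hc]
          exact ih a b _ _ ha hb rfl
        · have hadd : PySem.Set.add a card = a ++ [card] := PySem.Set.add_of_not_mem hca
          have hna : (a ++ [card]).Nodup := hadd ▸ PySem.Set.nodup_add _ _ ha
          have hsc := pvScAdd a b card hb hca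
          by_cases hcb : card ∈ b
          · have hc' : c + (-1 : Int) = pvSc (a ++ [card]) b := by rw [hsc, hc]; simp [hcb]
            simp only [pvStepA, pvStepB, PySem.Set.contains]
            simp [hwa, hact, hca, hcb]
            rw [hc']
            exact ih (a ++ [card]) b _ _ hna hb rfl
          · have hc' : c + (1 : Int) = pvSc (a ++ [card]) b := by rw [hsc, hc]; simp [hcb]
            simp only [pvStepA, pvStepB, PySem.Set.contains]
            simp [hwa, hact, hca, hcb]
            rw [hc']
            exact ih (a ++ [card]) b _ _ hna hb rfl
      · by_cases hca : card ∈ a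
        · have hna : (PySem.Set.discard a card).Nodup := List.Nodup.filter _ ha
          have hsc := pvScDiscard a b card ha hb hca
          by_cases hcb : card ∈ b
          · have hc' : c + (1 : Int) = pvSc (PySem.Set.discard a card) b := by rw [hsc, hc]; simp [hcb]
            simp only [pvStepA, pvStepB, PySem.Set.contains, PySem.Set.remove?]
            simp [hwa, hact, hca, hcb]
            rw [hc']
            exact ih (PySem.Set.discard a card) b _ _ hna hb rfl
          · have hc' : c + (-1 : Int) = pvSc (PySem.Set.discard a card) b := by rw [hsc, hc]; simp [hcb]
            simp only [pvStepA, pvStepB, PySem.Set.contains, PySem.Set.remove?]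
            simp [hwa, hact, hca, hcb]
            rw [hc']
            exact ih (PySem.Set.discard a card) b _ _ hna hb rfl
        · simp only [pvStepA, pvStepB, PySem.Set.contains]
          simp [hwa, hact, hca]
          rw [hc]
          exact ih a b _ _ ha hb rfl
    · by_cases hwb : who = "B"
      · have hswap : ∀ (x y : List Int), pvSc x y = pvSc y x := by
          intro x y; unfold pvSc; omega
        by_cases hact : action = 1
        · by_cases hcb : card ∈ b
          · have hadd : PySem.Set.add b card = b := PySem.Set.add_of_mem hcb
            simp only [pvStepA, pvStepB, PySem.Set.contains]
            simp [hwb, hact, hcb]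
            rw [hc]
            exact ih a b _ _ ha hb rfl
          · have hadd : PySem.Set.add b card = b ++ [card] := PySem.Set.add_of_not_mem hcb
            have hnb : (b ++ [card]).Nodup := hadd ▸ PySem.Set.nodup_add _ _ hb
            have hsc := pvScAdd b a card ha hcb
            by_cases hca : card ∈ a
            · have hc' : c + (-1 : Int) = pvSc a (b ++ [card]) := by
                rw [hswap a (b ++ [card]), hsc, hswap b a, hc]; simp [hca]
              simp only [pvStepA, pvStepB, PySem.Set.contains]
              simp [hwb, hact, hca, hcb]
              rw [hc']
              exact ih a (b ++ [card]) _ _ ha hnb rfl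
            · have hc' : c + (1 : Int) = pvSc a (b ++ [card]) := by
                rw [hswap a (b ++ [card]), hsc, hswap b a, hc]; simp [hca]
              simp only [pvStepA, pvStepB, PySem.Set.contains]
              simp [hwb, hact, hca, hcb]
              rw [hc']
              exact ih a (b ++ [card]) _ _ ha hnb rfl
        · by_cases hcb : card ∈ b
          · have hnb : (PySem.Set.discard b card).Nodup := List.Nodup.filter _ hb
            have hsc := pvScDiscard b a card hb ha hcb
            by_cases hca : card ∈ a
            · have hc' : c + (1 : Int) = pvSc a (PySem.Set.discard b card) := by
                rw [hswap a _, hsc, hswap b a, hc]; simp [hca]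
              simp only [pvStepA, pvStepB, PySem.Set.contains, PySem.Set.remove?]
              simp [hwb, hact, hca, hcb]
              rw [hc']
              exact ih a (PySem.Set.discard b card) _ _ ha hnb rfl
            · have hc' : c + (-1 : Int) = pvSc a (PySem.Set.discard b card) := by
                rw [hswap a _, hsc, hswap b a, hc]; simp [hca]
              simp only [pvStepA, pvStepB, PySem.Set.contains, PySem.Set.remove?]
              simp [hwb, hact, hca, hcb]
              rw [hc']
              exact ih a (PySem.Set.discard b card) _ _ ha hnb rfl
          · simp only [pvStepA, pvStepB, PySem.Set.contains]
            simp [hwb, hact, hcb]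
            rw [hc]
            exact ih a b _ _ ha hb rfl
      · simp only [pvStepA, pvStepB]
        simp [hwa, hwb]
        rw [hc]
        exact ih a b _ _ ha hb rfl

-- ===== VERDICT (by name: the statement is the Claim_ definition above) =====
theorem diversity_after_changes_spec : Claim_equal_diversity_after_changes := by
  intro ia ib us _
  unfold Spec_diversity_after_changes diversity_after_changes diversity_after_changes_alt
  exact pvLoop us (PySem.Set.ofList ia) (PySem.Set.ofList ib) _ []
    (PySem.Set.nodup_ofList ia) (PySem.Set.nodup_ofList ib)
    (by simp [PySem.Set.len, PySem.Set.symmDiff, pvSc])
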